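-- pv_equiv track=rewrite | github.com/sweettuse/pyaoc | leetcode/most_freq_used_words.py | parse
-- ===== SOURCE A (Python) =====
-- def _do_the_diff(c: list[str]) -> str:
--     if 'x' not in c:
--         return '0'
--
--     res = ''.join(c)
--     if res.endswith('x'):
--         return res[:-1] or '1'
--
--     coeff, exp = res.split('x^')
--     if not coeff or coeff == '-':
--         coeff += '1'
--
--     coeff, exp = int(coeff), int(exp)
--     if exp == 0:
--         return ''
--     if exp == 1:
--         return str(coeff)
--
--     return f'{coeff * exp}x**{exp - 1}'
--
-- def parse(eq: str):
--     cur = []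
--     for c in eq:
--         if cur and c in {'+', '-'}:
--             yield _do_the_diff(cur)
--             yield c
--             cur = []
--         else:
--             cur.append(c)
--     if cur:
--         yield _do_the_diff(cur)
-- ===== SOURCE B (Python) =====
-- def _do_the_diff(c: list[str]) -> str:
--     if 'x' not in c:
--         return '0'
--
--     res = ''.join(c)
--     if res.endswith('x'):
--         return res[:-1] or '1'
--
--     coeff, exp = res.split('x^')
--     if not coeff or coeff == '-':
--         coeff += '1'
--
--     coeff, exp = int(coeff), int(exp)
--     if exp == 0:
--         return ''
--     if exp == 1:
--         return str(coeff)
--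
--     return f'{coeff * exp}x**{exp - 1}'
--
--
-- def parse(eq: str):
--     # recursive decomposition: slice off the first term (the first char plus
--     # all following non-operator chars), emit it, then recurse past the operator
--     if not eq:
--         return
--     i = 1
--     while i < len(eq) and eq[i] not in '+-':
--         i += 1
--     yield _do_the_diff(list(eq[:i]))
--     if i < len(eq):
--         yield eq[i]
--         yield from parse(eq[i + 1:])
-- ===== Notes on version B (the rewrite author's own statement) =====
-- stated objective: simpler
-- what changed: A's single char-by-char loop with a mutable accumulator and flush-on-operator is replaced by a recursive decomposition that slices off the whole first term (first char plus the following run of non-operator chars) per step and recurses past the operator; Pre_ excludes only the inputs on which A (and B, sharing _do_the_diff) raises ValueError on a malformed term.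
import Mathlib
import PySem

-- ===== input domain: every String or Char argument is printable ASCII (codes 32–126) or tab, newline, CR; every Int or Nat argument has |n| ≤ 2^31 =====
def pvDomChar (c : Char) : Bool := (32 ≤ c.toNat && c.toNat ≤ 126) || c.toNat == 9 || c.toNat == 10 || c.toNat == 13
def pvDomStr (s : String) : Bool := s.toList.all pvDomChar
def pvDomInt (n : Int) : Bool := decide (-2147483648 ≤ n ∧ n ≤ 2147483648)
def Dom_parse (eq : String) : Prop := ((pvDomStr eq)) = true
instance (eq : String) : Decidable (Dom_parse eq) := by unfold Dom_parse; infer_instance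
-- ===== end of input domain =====

-- B replaces A's char-accumulator loop by slicing off one whole term per recursive step (simpler decomposition,
-- same cost); equivalence is about the sequence of yielded values (both Pythons are generators).

-- shared helper: c in {'+', '-'}
def opQ (c : Char) : Bool := c == '+' || c == '-'

-- shared helper: literal port of _do_the_diff (identical in Source A and Source B).
-- The `match … | _ =>` fallbacks are exactly where Python raises ValueError (tuple unpacking / int()); Pre_parse excludes those.
def doTheDiff (c : List Char) : String :=
  if !(c.contains 'x') then "0"
  else
    let res := c  -- ''.join(c), kept as List Char (exact)
    if PySem.Chars.endswith res ['x'] then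
      (if res.dropLast = [] then "1" else String.ofList res.dropLast)  -- res[:-1] or '1'
    else
      match PySem.Chars.splitOn res ['x', '^'] with
      | [co0, ex0] =>
        let co1 := if co0 = [] ∨ co0 = ['-'] then co0 ++ ['1'] else co0
        match PySem.Int.ofChars? co1, PySem.Int.ofChars? ex0 with
        | some coeff, some exp =>
          if exp = 0 then ""
          else if exp = 1 then PySem.Int.toStr coeff
          else PySem.Int.toStr (coeff * exp) ++ "x**" ++ PySem.Int.toStr (exp - 1)
        | _, _ => ""  -- int() ValueError: outside Pre_parse
      | _ => ""       -- unpacking ValueError: outside Pre_parse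

-- ===== PORT A =====
-- the loop state is (cur, yielded-so-far)
def parseStep (st : List Char × List String) (c : Char) : List Char × List String :=
  if st.1 ≠ [] ∧ opQ c then ([], st.2 ++ [doTheDiff st.1, String.ofList [c]])
  else (st.1 ++ [c], st.2)

def parse (eq : String) : List String :=
  let st := eq.toList.foldl parseStep ([], [])
  if st.1 ≠ [] then st.2 ++ [doTheDiff st.1] else st.2

-- ===== PORT B =====
-- eq[:i] with i = 1 + length of the maximal non-operator run after the first char, then recurse on eq[i+1:]
def parseAltGo (l : List Char) : List String :=
  match l with
  | [] => []
  | c :: rest =>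
    let t := c :: rest.takeWhile (fun d => !opQ d)
    match h : rest.dropWhile (fun d => !opQ d) with
    | [] => [doTheDiff t]
    | op :: rest' => doTheDiff t :: String.ofList [op] :: parseAltGo rest'
termination_by l.length
decreasing_by
  have h1 : (rest.dropWhile (fun d => !opQ d)).length ≤ rest.length :=
    List.length_dropWhile_le _ rest
  rw [h] at h1
  simp at h1 ⊢
  omega

def parse_alt (eq : String) : List String := parseAltGo eq.toList

-- ===== PRECONDITION & SPEC =====
-- Closed-form description of where both programs break eq into terms: an operator char at position i
-- starts a new term iff its offset inside its maximal run of operator chars has the right parity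
-- (the run's first operator splits unless it is the very first char of eq; within a run every second one splits).
def opRunBefore (l : List Char) (i : Nat) : Nat := ((l.take i).reverse.takeWhile opQ).length

def isCut (l : List Char) (i : Nat) : Bool :=
  opQ (l.getD i ' ') && decide (1 ≤ i) && ((i - max (i - opRunBefore l i) 1) % 2 == 0)

-- the term slices of eq: the pieces between consecutive cut positions
def termsOf (l : List Char) : List (List Char) :=
  let cs := (List.range l.length).filter (isCut l)
  ((0 :: cs.map (· + 1)).zip (cs ++ [l.length])).map (fun p => (l.drop p.1).take (p.2 - p.1))

-- a term on which _do_the_diff returns normally (no ValueError)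
def okTerm (t : List Char) : Bool :=
  !(t.contains 'x') ||
  PySem.Chars.endswith t ['x'] ||
  (match PySem.Chars.splitOn t ['x', '^'] with
   | [co, ex] =>
     (co == [] || co == ['-'] || (PySem.Int.ofChars? co).isSome) && (PySem.Int.ofChars? ex).isSome
   | _ => false)

-- Pre_parse: exactly the inputs on which Python A returns (every term parses; elsewhere A raises ValueError)
def Pre_parse (eq : String) : Prop := (termsOf eq.toList).all okTerm = true
instance (eq : String) : Decidable (Pre_parse eq) := by unfold Pre_parse; infer_instance

def pvWitness_parse : String := "x^2+3x-1"

def Spec_parse (eq : String) (out : List String) : Prop := out = parse_alt eq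
instance (eq : String) (out : List String) : Decidable (Spec_parse eq out) := by unfold Spec_parse; infer_instance

-- ===== CLAIM (what is proved, stated in full; the proofs are below) =====
def Claim_equal_parse : Prop := ∀ (eq : String), Dom_parse eq → Pre_parse eq → Spec_parse eq (parse eq)

-- ===== LEMMAS AND PROOFS =====

-- proof-only helper: A's flush of a nonempty accumulator `cur` followed by the remaining input `l`
def flushCont (cur l : List Char) : List String :=
  match l.dropWhile (fun d => !opQ d) with
  | [] => [doTheDiff (cur ++ l.takeWhile (fun d => !opQ d))]
  | op :: rest' =>
      doTheDiff (cur ++ l.takeWhile (fun d => !opQ d)) :: String.ofList [op] :: parseAltGo rest'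

lemma parseAltGo_cons (c : Char) (rest : List Char) :
    parseAltGo (c :: rest) = flushCont [c] rest := by
  rw [parseAltGo, flushCont]
  cases h : rest.dropWhile (fun d => !opQ d) <;> simp

-- the loop invariant, both accumulator states at once, by strong induction on the length
lemma parse_loop (n : ℕ) : ∀ l : List Char, l.length ≤ n →
    (∀ out : List String,
      (let st := l.foldl parseStep ([], out)
       if st.1 ≠ [] then st.2 ++ [doTheDiff st.1] else st.2) = out ++ parseAltGo l) ∧
    (∀ (cur : List Char) (out : List String), cur ≠ [] →
      (let st := l.foldl parseStep (cur, out)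
       if st.1 ≠ [] then st.2 ++ [doTheDiff st.1] else st.2) = out ++ flushCont cur l) := by
  induction n with
  | zero =>
    intro l hl
    have : l = [] := List.eq_nil_of_length_eq_zero (Nat.le_zero.mp hl)
    subst this
    constructor
    · intro out; simp [parseAltGo]
    · intro cur out hcur; simp [flushCont, hcur]
  | succ n ih =>
    intro l hl
    match l with
    | [] =>
      constructor
      · intro out; simp [parseAltGo]
      · intro cur out hcur; simp [flushCont, hcur]
    | c :: rest =>
      have hrest : rest.length ≤ n := by simpa using hl
      constructor
      · intro out
        have hstep : parseStep ([], out) c = ([c], out) := by simp [parseStep]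
        simp only [List.foldl_cons, hstep]
        rw [(ih rest hrest).2 [c] out (by simp), parseAltGo_cons]
      · intro cur out hcur
        by_cases hop : opQ c = true
        · have hstep : parseStep (cur, out) c = ([], out ++ [doTheDiff cur, String.ofList [c]]) := by
            simp [parseStep, hcur, hop]
          simp only [List.foldl_cons, hstep]
          rw [(ih rest hrest).1 (out ++ [doTheDiff cur, String.ofList [c]])]
          have hdw : (c :: rest).dropWhile (fun d => !opQ d) = c :: rest := by
            simp [List.dropWhile, hop]
          have htw : (c :: rest).takeWhile (fun d => !opQ d) = [] := by
            simp [List.takeWhile, hop]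
          simp [flushCont, hdw, htw]
        · have hstep : parseStep (cur, out) c = (cur ++ [c], out) := by
            simp [parseStep, hop]
          simp only [List.foldl_cons, hstep]
          rw [(ih rest hrest).2 (cur ++ [c]) out (by simp)]
          have hb : (!opQ c) = true := by simp [hop]
          have hdw : (c :: rest).dropWhile (fun d => !opQ d) = rest.dropWhile (fun d => !opQ d) := by
            simp [List.dropWhile, hb]
          have htw : (c :: rest).takeWhile (fun d => !opQ d) = c :: rest.takeWhile (fun d => !opQ d) := by
            simp [List.takeWhile, hb]
          simp [flushCont, hdw, htw]

-- ===== VERDICT (by name: the statement is the Claim_ definition above) =====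
theorem parse_spec : Claim_equal_parse := by
  intro eq _ _
  unfold Spec_parse parse parse_alt
  simpa using (parse_loop eq.toList.length eq.toList le_rfl).1 []
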